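-- pv_equiv track=rewrite | github.com/whatshap/whatshap | tests/test_pedigreephasing.py | get_trio_transmission_vectors
-- ===== SOURCE A (Python) =====
-- from collections import defaultdict
--
-- def get_trio_transmission_vectors(transmission_vector, nr_of_trios):
--     trio_transmission_vectors = defaultdict(list)
--     for transmission_value in transmission_vector:
--         for trio in range(nr_of_trios):
--             value = transmission_value % 4
--             transmission_value = transmission_value // 4
--             trio_transmission_vectors[trio].append(value)
--     return trio_transmission_vectors
-- ===== SOURCE B (Python) =====
-- from collections import defaultdict
--
-- def get_trio_transmission_vectors(transmission_vector, nr_of_trios):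
--     trio_transmission_vectors = defaultdict(list)
--     for trio in range(nr_of_trios):
--         for transmission_value in transmission_vector:
--             trio_transmission_vectors[trio].append((transmission_value >> (2 * trio)) % 4)
--     return trio_transmission_vectors
-- ===== Notes on version B (the rewrite author's own statement) =====
-- stated objective: simpler
-- what changed: Each base-4 digit is extracted in closed form ((v >> (2*trio)) % 4) with the loop nesting reversed (outer over trios, inner over the vector), replacing A's sequential mutate-and-divide state machine.
import Mathlib
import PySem

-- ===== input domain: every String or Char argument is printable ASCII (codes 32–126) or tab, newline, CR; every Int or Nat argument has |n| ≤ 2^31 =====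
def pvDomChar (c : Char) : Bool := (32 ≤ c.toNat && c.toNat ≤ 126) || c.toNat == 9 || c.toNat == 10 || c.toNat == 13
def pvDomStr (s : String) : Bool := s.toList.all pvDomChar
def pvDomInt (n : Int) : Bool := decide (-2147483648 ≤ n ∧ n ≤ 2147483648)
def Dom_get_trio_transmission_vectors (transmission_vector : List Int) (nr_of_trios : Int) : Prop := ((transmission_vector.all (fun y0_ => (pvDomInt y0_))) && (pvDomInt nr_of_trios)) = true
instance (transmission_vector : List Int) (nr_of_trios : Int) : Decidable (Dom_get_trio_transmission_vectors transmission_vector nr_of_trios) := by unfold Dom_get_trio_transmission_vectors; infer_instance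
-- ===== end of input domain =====

-- B replaces A's sequential mutate-and-divide loop by closed-form base-4 digit extraction
-- ((v // 4**trio) % 4) with the loop nesting reversed (outer over trios); same cost, simpler.

-- ===== PORT A =====
-- A: for each value, repeatedly take % 4 and floor-divide by 4, appending to trio_transmission_vectors[trio]
-- (the Python locals 'value'/'transmission_value' are inlined into the state pair; same computation step for step)
def get_trio_transmission_vectors (transmission_vector : List Int) (nr_of_trios : Int) : List (Int × List Int) :=
  (transmission_vector.foldl
    (fun (d : PySem.Dict Int (List Int)) transmission_value =>
      ((PySem.List.pyRange 0 nr_of_trios 1).foldl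
        (fun (s : Int × PySem.Dict Int (List Int)) trio =>
          (PySem.Int.floordiv s.1 4,
           s.2.modify trio [] (fun l => l ++ [PySem.Int.mod s.1 4])))
        (transmission_value, d)).2)
    PySem.Dict.empty).items

-- ===== PORT B =====
-- (v >> (2 * trio)) % 4 ;  Python's >> is Lean's >>> (shift count as Nat via .toNat — exact since trio ∈ range(nr_of_trios) is ≥ 0)
def pvDigit (v trio : Int) : Int := PySem.Int.mod (v >>> (2 * trio).toNat) 4

def get_trio_transmission_vectors_alt (transmission_vector : List Int) (nr_of_trios : Int) : List (Int × List Int) :=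
  ((PySem.List.pyRange 0 nr_of_trios 1).foldl
    (fun (d : PySem.Dict Int (List Int)) trio =>
      transmission_vector.foldl
        (fun d transmission_value =>
          d.modify trio [] (fun l => l ++ [pvDigit transmission_value trio]))
        d)
    PySem.Dict.empty).items

-- ===== PRECONDITION & SPEC =====
def Spec_get_trio_transmission_vectors (transmission_vector : List Int) (nr_of_trios : Int) (out : List (Int × List Int)) : Prop := out = get_trio_transmission_vectors_alt transmission_vector nr_of_trios
instance (transmission_vector : List Int) (nr_of_trios : Int) (out : List (Int × List Int)) : Decidable (Spec_get_trio_transmission_vectors transmission_vector nr_of_trios out) := by unfold Spec_get_trio_transmission_vectors; infer_instance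

-- ===== CLAIM (what is proved, stated in full; the proofs are below) =====
def Claim_equal_get_trio_transmission_vectors : Prop := ∀ (transmission_vector : List Int) (nr_of_trios : Int), Dom_get_trio_transmission_vectors transmission_vector nr_of_trios → Spec_get_trio_transmission_vectors transmission_vector nr_of_trios (get_trio_transmission_vectors transmission_vector nr_of_trios)

-- ===== LEMMAS AND PROOFS =====

-- the common modify-append step both ports reduce to
def pvStep (d : PySem.Dict Int (List Int)) (p : Int × Int) : PySem.Dict Int (List Int) :=
  d.modify p.1 [] (fun l => l ++ [p.2])

lemma pvRange0 (n : Int) :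
    PySem.List.pyRange 0 n 1 = (List.range n.toNat).map (fun (k : Nat) => (k : Int)) := by
  rw [PySem.List.pyRange_one]
  simp only [zero_add, sub_zero]

lemma pvFoldlFlatMap {α β γ : Type} (l : List α) (f : α → List β) (g : γ → β → γ) (i : γ) :
    (l.flatMap f).foldl g i = l.foldl (fun a x => (f x).foldl g a) i := by
  induction l generalizing i with
  | nil => rfl
  | cons x xs ih => simp [List.flatMap_cons, List.foldl_append, ih]

-- the shifted digit is the floor-divided digit
lemma pvShift (v : Int) (m : Nat) : v >>> (2 * m) = PySem.Int.floordiv v (4 ^ m) := by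
  rw [PySem.Int.floordiv_eq_ediv_of_pos (by positivity), Int.shiftRight_eq_div_pow]
  norm_num [pow_mul]

-- A's inner loop: after m steps the running value is v // 4^m and the k-th step appended pvDigit v k
lemma pvInnerA (m : Nat) (v : Int) (d : PySem.Dict Int (List Int)) :
    ((List.range m).map (fun (k : Nat) => (k : Int))).foldl
      (fun (s : Int × PySem.Dict Int (List Int)) trio =>
        (PySem.Int.floordiv s.1 4,
         s.2.modify trio [] (fun l => l ++ [PySem.Int.mod s.1 4])))
      (v, d)
    = (PySem.Int.floordiv v (4 ^ m),
       ((List.range m).map (fun (k : Nat) => (k : Int))).foldl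
         (fun d k => d.modify k [] (fun l => l ++ [pvDigit v k])) d) := by
  induction m generalizing d with
  | zero =>
      simp
  | succ m ih =>
      rw [List.range_succ, List.map_append, List.foldl_append, List.foldl_append, ih]
      simp only [List.map_cons, List.map_nil, List.foldl_cons, List.foldl_nil, Prod.mk.injEq]
      constructor
      · rw [PySem.Int.floordiv_eq_ediv_of_pos (by positivity : (0:Int) < 4 ^ m),
            PySem.Int.floordiv_eq_ediv_of_pos (by norm_num : (0:Int) < 4),
            PySem.Int.floordiv_eq_ediv_of_pos (by positivity : (0:Int) < 4 ^ (m + 1)),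
            pow_succ, Int.ediv_ediv_of_nonneg (by positivity)]
      · have hd : pvDigit v ((m : Nat) : Int) = PySem.Int.mod (PySem.Int.floordiv v (4 ^ m)) 4 := by
          have h2 : ((2 * ((m : Nat) : Int)).toNat) = 2 * m := by omega
          rw [pvDigit, h2, pvShift]
        rw [hd]

lemma pvFilterNodup (r : List Int) (hr : r.Nodup) (j : Int) :
    r.filter (fun k => k == j) = if j ∈ r then [j] else [] := by
  induction r with
  | nil => simp
  | cons k r ih =>
      rcases List.nodup_cons.mp hr with ⟨hk, hr'⟩
      by_cases h : k = j
      · subst h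
        simp [ih hr', hk]
      · simp [h, ih hr', Ne.symm h]

-- value lists of the flattened A-order pair list, per key
lemma pvGetA (tv : List Int) (r : List Int) (hr : r.Nodup) (j : Int) :
    ((tv.flatMap (fun v => r.map (fun k => (k, pvDigit v k)))).filter
        (fun p => p.1 == j)).map (·.2)
    = if j ∈ r then tv.map (fun v => pvDigit v j) else [] := by
  induction tv with
  | nil => simp
  | cons v tv ih =>
      rw [List.flatMap_cons, List.filter_append, List.map_append, ih]
      have h1 : ((r.map (fun k => (k, pvDigit v k))).filter (fun p => p.1 == j)).map (·.2)
          = if j ∈ r then [pvDigit v j] else [] := by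
        rw [List.filter_map]
        have h2 : ((fun p : Int × Int => p.1 == j) ∘ fun k => (k, pvDigit v k))
            = fun k => k == j := rfl
        rw [h2, pvFilterNodup r hr j]
        by_cases h : j ∈ r <;> simp [h]
      rw [h1]
      by_cases h : j ∈ r <;> simp [h]

-- value lists of the flattened B-order pair list, per key
lemma pvGetB (tv : List Int) (r : List Int) (hr : r.Nodup) (j : Int) :
    ((r.flatMap (fun k => tv.map (fun v => (k, pvDigit v k)))).filter
        (fun p => p.1 == j)).map (·.2)
    = if j ∈ r then tv.map (fun v => pvDigit v j) else [] := by
  induction r with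
  | nil => simp
  | cons k r ih =>
      rcases List.nodup_cons.mp hr with ⟨hk, hr'⟩
      rw [List.flatMap_cons, List.filter_append, List.map_append, ih hr']
      have h1 : ((tv.map (fun v => (k, pvDigit v k))).filter (fun p => p.1 == j)).map (·.2)
          = if k = j then tv.map (fun v => pvDigit v j) else [] := by
        rw [List.filter_map]
        have h2 : ((fun p : Int × Int => p.1 == j) ∘ fun v => (k, pvDigit v k))
            = fun _ => k == j := rfl
        rw [h2]
        by_cases h : k = j
        · subst h; simp [List.map_map]
        · simp [h]
      rw [h1]
      by_cases h : k = j
      · subst h; simp [hk]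
      · simp [h, Ne.symm h]

lemma pvConstOfList (tv : List Int) (h : tv ≠ []) (k : Int) :
    PySem.Set.ofList (tv.map (fun _ => k)) = [k] := by
  induction tv using List.reverseRecOn with
  | nil => exact absurd rfl h
  | append_singleton tv v ih =>
      rw [List.map_append, List.map_singleton, PySem.Set.ofList_append_singleton]
      by_cases htv : tv = []
      · subst htv; simp
      · rw [ih htv, PySem.Set.add_of_mem (by simp)]

lemma pvKeysA (tv : List Int) (r : List Int) (hr : r.Nodup) :
    PySem.Set.ofList (tv.flatMap (fun _ => r)) = if tv = [] then [] else r := by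
  cases tv with
  | nil => simp
  | cons v tv =>
      rw [List.flatMap_cons, PySem.Set.ofList_append, PySem.Set.update_eq_append_filter,
          PySem.Set.ofList_eq_self_of_nodup r hr]
      have hf : ((PySem.Set.ofList (tv.flatMap fun _ => r)).filter
          (fun y => !(PySem.Set.contains r y))) = [] := by
        rw [List.filter_eq_nil_iff]
        intro y hy
        have hyr : y ∈ r := by
          have hmem : y ∈ tv.flatMap (fun _ => r) := by simpa [pysem] using hy
          obtain ⟨x, _, hx⟩ := List.mem_flatMap.mp hmem
          exact hx
        simp [PySem.Set.contains_eq_listContains, hyr]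
      rw [hf]
      simp

lemma pvKeysB (tv : List Int) (r : List Int) (hr : r.Nodup) (h : tv ≠ []) :
    PySem.Set.ofList (r.flatMap (fun k => tv.map (fun _ => k))) = r := by
  induction r with
  | nil => simp
  | cons k r ih =>
      rcases List.nodup_cons.mp hr with ⟨hk, hr'⟩
      rw [List.flatMap_cons, PySem.Set.ofList_append, pvConstOfList tv h k,
          PySem.Set.update_eq_append_filter, ih hr']
      have hf : (r.filter (fun y => !(PySem.Set.contains [k] y))) = r := by
        rw [List.filter_eq_self]
        intro y hy
        have hyk : y ≠ k := fun hyk => hk (hyk ▸ hy)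
        simp [PySem.Set.contains_eq_listContains, hyk]
      rw [hf]
      rfl

-- the central equality
lemma pvMain (tv : List Int) (n : Int) :
    get_trio_transmission_vectors tv n = get_trio_transmission_vectors_alt tv n := by
  unfold get_trio_transmission_vectors get_trio_transmission_vectors_alt
  rw [pvRange0]
  set rl : List Int := (List.range n.toNat).map (fun (k : Nat) => (k : Int)) with hrl
  have hnd : rl.Nodup := by
    rw [hrl]; exact List.nodup_range.map Nat.cast_injective
  have hA : (tv.foldl
      (fun (d : PySem.Dict Int (List Int)) transmission_value =>
        (rl.foldl
          (fun (s : Int × PySem.Dict Int (List Int)) trio =>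
            (PySem.Int.floordiv s.1 4,
             s.2.modify trio [] (fun l => l ++ [PySem.Int.mod s.1 4])))
          (transmission_value, d)).2)
      PySem.Dict.empty)
      = (tv.flatMap (fun v => rl.map (fun k => (k, pvDigit v k)))).foldl pvStep
          PySem.Dict.empty := by
    rw [pvFoldlFlatMap]
    refine PySem.List.foldl_congr_mem _ _ _ _ ?_
    intro d v _
    rw [hrl, pvInnerA]
    simp [pvStep, List.foldl_map, List.map_map]
  have hB : (rl.foldl
      (fun (d : PySem.Dict Int (List Int)) trio =>
        tv.foldl
          (fun d transmission_value =>
            d.modify trio [] (fun l => l ++ [pvDigit transmission_value trio]))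
          d)
      PySem.Dict.empty)
      = (rl.flatMap (fun k => tv.map (fun v => (k, pvDigit v k)))).foldl pvStep
          PySem.Dict.empty := by
    rw [pvFoldlFlatMap]
    refine PySem.List.foldl_congr_mem _ _ _ _ ?_
    intro d k _
    simp [pvStep, List.foldl_map]
  rw [hA, hB]
  have keysEq : ∀ (L : List (Int × Int)),
      (L.foldl pvStep PySem.Dict.empty).keys = PySem.Set.ofList (L.map (·.1)) := by
    intro L
    have h := PySem.Dict.keys_foldl_modify_key (l := L) (key := fun p : Int × Int => p.1)
      (d0 := ([] : List Int)) (f := fun _ p => fun l => l ++ [p.2]) (d := PySem.Dict.empty)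
    simpa [pvStep, PySem.Dict.keys_empty, PySem.Set.update_nil_left] using h
  have ndKeys : ∀ (L : List (Int × Int)),
      (L.foldl pvStep PySem.Dict.empty).keys.Nodup := by
    intro L
    have h := PySem.Dict.nodup_keys_foldl_modify_key (l := L) (key := fun p : Int × Int => p.1)
      (d0 := ([] : List Int)) (f := fun _ p => fun l => l ++ [p.2]) (d := PySem.Dict.empty)
      (by simp [PySem.Dict.keys_empty])
    simpa [pvStep] using h
  have getDEq : ∀ (L : List (Int × Int)) (j : Int),
      (L.foldl pvStep PySem.Dict.empty).getD j [] = (L.filter (fun p => p.1 == j)).map (·.2) := by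
    intro L j
    have h := PySem.Dict.getD_foldl_modify_append (l := L) (d := PySem.Dict.empty) (c := j)
    simpa [pvStep, PySem.Dict.getD_empty] using h
  rw [PySem.Dict.items_eq_map_keys _ (ndKeys _) ([] : List Int),
      PySem.Dict.items_eq_map_keys _ (ndKeys _) ([] : List Int),
      keysEq, keysEq]
  have hmapA : (tv.flatMap (fun v => rl.map (fun k => (k, pvDigit v k)))).map
      (fun p : Int × Int => p.1) = tv.flatMap (fun _ => rl) := by
    simp [List.map_flatMap, List.map_map, Function.comp_def]
  have hmapB : (rl.flatMap (fun k => tv.map (fun v => (k, pvDigit v k)))).map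
      (fun p : Int × Int => p.1) = rl.flatMap (fun k => tv.map (fun _ => k)) := by
    simp [List.map_flatMap, List.map_map, Function.comp_def]
  rw [hmapA, hmapB, pvKeysA tv rl hnd]
  by_cases htv : tv = []
  · subst htv
    have hnil : (rl.flatMap (fun _ : Int => ([] : List Int))) = [] :=
      List.flatMap_eq_nil_iff.mpr (by intro x _; rfl)
    simp [hnil]
  · rw [pvKeysB tv rl hnd htv, if_neg htv]
    refine List.map_congr_left ?_
    intro k hk
    rw [getDEq, getDEq, pvGetA tv rl hnd k, pvGetB tv rl hnd k]

-- ===== VERDICT (by name: the statement is the Claim_ definition above) =====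
theorem get_trio_transmission_vectors_spec : Claim_equal_get_trio_transmission_vectors := by
  intro tv n _
  unfold Spec_get_trio_transmission_vectors
  exact pvMain tv n
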